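-- pv_equiv track=rewrite | github.com/rayankikavitha/InterviewPrep | mukha/fb_onsite_python.py | cal_L7
-- ===== SOURCE A (Python) =====
-- def cal_L7( input, category):
--  	output = {}
--  	for k,v in category.items():
--  		for each_v in v:
--  			if k not in output:
--  				output[k] = input[each_v]
--  			else:
--  				output[k] = list(map(max,output[k],input[each_v]))
--
--  	return output
-- ===== SOURCE B (Python) =====
-- def cal_L7(input, category):
--     output = {}
--     for k, v in category.items():
--         cols = [input[i] for i in v]
--         if cols:
--             output[k] = [max(col) for col in zip(*cols)]
--     return output
-- ===== Notes on version B (the rewrite author's own statement) =====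
-- stated objective: alternative
-- what changed: B replaces A's incremental left-fold accumulator (seed with the first referenced list, then repeatedly map(max,acc,next)) by a collect-then-transpose pass: gather all referenced lists for a key and take the column-wise maximum of zip(*cols).
import Mathlib
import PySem

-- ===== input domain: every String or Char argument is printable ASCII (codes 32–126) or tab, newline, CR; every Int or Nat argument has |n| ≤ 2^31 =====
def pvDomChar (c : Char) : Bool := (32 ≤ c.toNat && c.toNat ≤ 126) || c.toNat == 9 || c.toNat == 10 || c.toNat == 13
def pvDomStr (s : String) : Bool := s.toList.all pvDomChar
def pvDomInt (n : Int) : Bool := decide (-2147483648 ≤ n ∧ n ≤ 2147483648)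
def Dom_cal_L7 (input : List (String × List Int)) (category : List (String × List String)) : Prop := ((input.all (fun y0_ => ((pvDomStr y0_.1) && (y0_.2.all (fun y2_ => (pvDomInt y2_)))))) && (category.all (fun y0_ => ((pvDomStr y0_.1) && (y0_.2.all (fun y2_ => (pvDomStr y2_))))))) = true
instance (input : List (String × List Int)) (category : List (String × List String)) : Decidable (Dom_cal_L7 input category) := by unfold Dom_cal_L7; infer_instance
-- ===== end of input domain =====

-- B computes each category's value by collecting the referenced lists and taking a
-- column-wise maximum over the transposed columns, instead of A's incremental
-- left-fold of pairwise elementwise maxima (objective: alternative decomposition).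


-- ===== PORT A =====
-- literal port of A: for k,v in category.items(): for each_v in v:
--   if k not in output: output[k] = input[each_v] else: output[k] = list(map(max, output[k], input[each_v]))
-- (map(max, a, b) truncates to the shorter list = List.zipWith max)
def cal_L7 (input : List (String × List Int)) (category : List (String × List String)) : List (String × List Int) :=
  (category.foldl (fun o (p : String × List String) =>
    p.2.foldl (fun o x =>
      if o.contains p.1 = false then
        o.insert p.1 (((PySem.Dict.mk input).get? x).getD [])
      else
        o.insert p.1 (List.zipWith max (o.getD p.1 []) (((PySem.Dict.mk input).get? x).getD []))) o)
    PySem.Dict.empty).items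

-- ===== PORT B =====
-- Python max(col) over a nonempty tuple: head as initial value, fold max over the tail
def maxListPy (l : List Int) : Int := l.tail.foldl max l.headI

-- zip(*(c :: cs)): hand port, exact for lists of Int lists — stops at the shortest list
def zipColsAux : List Int → List (List Int) → List (List Int)
  | [], _ => []
  | a :: c, cs =>
      if cs.any (fun l => l.isEmpty) then []
      else (a :: cs.map (fun l => l.headI)) :: zipColsAux c (cs.map (fun l => l.tail))

def zipCols : List (List Int) → List (List Int)
  | [] => []
  | c :: cs => zipColsAux c cs

def cal_L7_alt (input : List (String × List Int)) (category : List (String × List String)) : List (String × List Int) :=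
  (category.foldl (fun o (p : String × List String) =>
    let cols := p.2.map (fun x => ((PySem.Dict.mk input).get? x).getD [])
    if cols.isEmpty then o
    else o.insert p.1 ((zipCols cols).map maxListPy))
    PySem.Dict.empty).items

-- ===== PRECONDITION & SPEC =====
-- input and category stand for Python dicts, whose keys are necessarily distinct, so
-- duplicate-key association lists represent no Python input and are excluded; and every
-- name referenced by a category must be a key of input, else A raises KeyError.
def Pre_cal_L7 (input : List (String × List Int)) (category : List (String × List String)) : Prop :=
  (input.map Prod.fst).Nodup ∧ (category.map Prod.fst).Nodup ∧
  ∀ p ∈ category, ∀ s ∈ p.2, s ∈ input.map Prod.fst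
instance (input : List (String × List Int)) (category : List (String × List String)) : Decidable (Pre_cal_L7 input category) := by unfold Pre_cal_L7; infer_instance

def pvWitness_cal_L7 : (List (String × List Int)) × (List (String × List String)) :=
  ([("a", [1, 5]), ("b", [3, 2, 9])], [("c", ["a", "b"]), ("d", ["b"]), ("e", [])])

def Spec_cal_L7 (input : List (String × List Int)) (category : List (String × List String)) (out : List (String × List Int)) : Prop := out = cal_L7_alt input category
instance (input : List (String × List Int)) (category : List (String × List String)) (out : List (String × List Int)) : Decidable (Spec_cal_L7 input category out) := by unfold Spec_cal_L7; infer_instance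

-- ===== CLAIM (what is proved, stated in full; the proofs are below) =====
def Claim_equal_cal_L7 : Prop := ∀ (input : List (String × List Int)) (category : List (String × List String)), Dom_cal_L7 input category → Pre_cal_L7 input category → Spec_cal_L7 input category (cal_L7 input category)

-- ===== LEMMAS AND PROOFS =====

theorem foldl_zipmax_nil (cs : List (List Int)) :
    cs.foldl (fun a x => List.zipWith max a x) [] = [] := by
  induction cs with
  | nil => rfl
  | cons d ds ih => simpa using ih

theorem foldl_zipmax_mem_nil (cs : List (List Int)) (init : List Int)
    (h : ∃ l ∈ cs, l = []) :
    cs.foldl (fun a x => List.zipWith max a x) init = [] := by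
  induction cs generalizing init with
  | nil => simp at h
  | cons d ds ih =>
    rcases h with ⟨l, hl, hnil⟩
    rcases List.mem_cons.mp hl with h1 | h2
    · subst h1; subst hnil
      simpa using foldl_zipmax_nil ds
    · exact ih _ ⟨l, h2, hnil⟩

theorem foldl_zipmax_cons (cs : List (List Int)) (a : Int) (c : List Int)
    (h : ∀ l ∈ cs, l ≠ []) :
    cs.foldl (fun acc x => List.zipWith max acc x) (a :: c) =
      (cs.foldl (fun m l => max m l.headI) a) ::
        (cs.map List.tail).foldl (fun acc x => List.zipWith max acc x) c := by
  induction cs generalizing a c with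
  | nil => rfl
  | cons d ds ih =>
    rcases d with _ | ⟨b, d'⟩
    · exact absurd rfl (h [] (List.mem_cons_self))
    · simpa using ih (max a b) (List.zipWith max c d')
        (fun l hl => h l (List.mem_cons_of_mem _ hl))

theorem foldl_zipmax_eq_zipCols (c : List Int) (cs : List (List Int)) :
    cs.foldl (fun a x => List.zipWith max a x) c = (zipCols (c :: cs)).map maxListPy := by
  induction c generalizing cs with
  | nil => simp [zipCols, zipColsAux, foldl_zipmax_nil]
  | cons a c' ih =>
    by_cases h : cs.any (fun l => l.isEmpty)
    · have : ∃ l ∈ cs, l = [] := by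
        rcases List.any_eq_true.mp h with ⟨l, hl, he⟩
        exact ⟨l, hl, List.isEmpty_iff.mp he⟩
      rw [foldl_zipmax_mem_nil cs (a :: c') this]
      simp [zipCols, zipColsAux, h]
    · have hne : ∀ l ∈ cs, l ≠ [] := by
        intro l hl hnil
        exact h (List.any_eq_true.mpr ⟨l, hl, by simp [hnil]⟩)
      rw [foldl_zipmax_cons cs a c' hne]
      have := ih (cs.map List.tail)
      simp only [zipCols] at this ⊢
      simp [zipColsAux, h, List.map_cons, maxListPy, List.foldl_map, this]

-- once k is in the dict, A's inner loop repeatedly overwrites k with the running zipWith max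
theorem inner_loop_insert (f : String → List Int) (k : String)
    (xs : List String) (o : PySem.Dict String (List Int)) (a : List Int) :
    xs.foldl (fun o x =>
      if o.contains k = false then o.insert k (f x)
      else o.insert k (List.zipWith max (o.getD k []) (f x))) (o.insert k a) =
    o.insert k ((xs.map f).foldl (fun acc x => List.zipWith max acc x) a) := by
  induction xs generalizing a with
  | nil => rfl
  | cons y ys ih =>
    simp only [List.foldl_cons, PySem.Dict.contains_insert_self,
      PySem.Dict.getD_insert_self, PySem.Dict.insert_insert_self, List.map_cons]
    exact ih (List.zipWith max a (f y))

theorem outer_loop_eq (f : String → List Int) (category : List (String × List String))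
    (o : PySem.Dict String (List Int))
    (hnd : (category.map Prod.fst).Nodup)
    (hfresh : ∀ p ∈ category, o.contains p.1 = false) :
    category.foldl (fun o (p : String × List String) =>
      p.2.foldl (fun o x =>
        if o.contains p.1 = false then o.insert p.1 (f x)
        else o.insert p.1 (List.zipWith max (o.getD p.1 []) (f x))) o) o =
    category.foldl (fun o (p : String × List String) =>
      let cols := p.2.map f
      if cols.isEmpty then o else o.insert p.1 ((zipCols cols).map maxListPy)) o := by
  induction category generalizing o with
  | nil => rfl
  | cons p rest ih =>
    rcases p with ⟨k, v⟩
    have hk : o.contains k = false := hfresh (k, v) (List.mem_cons_self)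
    have hnd' : (rest.map Prod.fst).Nodup := (List.nodup_cons.mp hnd).2
    have hknot : k ∉ rest.map Prod.fst := (List.nodup_cons.mp hnd).1
    rcases v with _ | ⟨x, xs⟩
    · simp only [List.foldl_cons, List.foldl_nil, List.map_nil, List.isEmpty_nil]
      exact ih o hnd' (fun q hq => hfresh q (List.mem_cons_of_mem _ hq))
    · have hstep : xs.foldl (fun o y =>
          if o.contains k = false then o.insert k (f y)
          else o.insert k (List.zipWith max (o.getD k []) (f y)))
          (if o.contains k = false then o.insert k (f x)
           else o.insert k (List.zipWith max (o.getD k []) (f x))) =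
          o.insert k ((zipCols (f x :: xs.map f)).map maxListPy) := by
        rw [if_pos hk, inner_loop_insert f k xs o (f x), foldl_zipmax_eq_zipCols]
      simp only [List.foldl_cons, List.map_cons, List.isEmpty_cons, Bool.false_eq_true,
        if_false]
      rw [hstep]
      exact ih _ hnd' (fun q hq => by
        rw [PySem.Dict.contains_insert]
        have h1 : (q.1 == k) = false := by
          simp only [beq_eq_false_iff_ne]
          intro h
          exact hknot (h ▸ List.mem_map_of_mem hq)
        rw [h1, hfresh q (List.mem_cons_of_mem _ hq)]
        rfl)

-- ===== VERDICT (by name: the statement is the Claim_ definition above) =====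
theorem cal_L7_spec : Claim_equal_cal_L7 := by
  intro input category _ hpre
  unfold Spec_cal_L7 cal_L7 cal_L7_alt
  rw [outer_loop_eq _ category PySem.Dict.empty hpre.2.1
    (fun p _ => by simp [PySem.Dict.contains_empty])]
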